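-- pv_equiv track=rewrite | github.com/bitalizer/pyflashkit | flashkit/decompile/helpers.py | expand_multiline_stmt
-- ===== SOURCE A (Python) =====
-- INDENT_UNIT = "    "
--
-- def expand_multiline_stmt(stmt: str, base_indent: str) -> list[str]:
--     """Split a statement containing object-literal newlines into indented lines.
--
--     Object literals use bare ``\\n`` as separators internally; this function
--     adds the right indent on each line, increasing one level per ``{`` and
--     returning to the outer level on ``}``.
--     """
--     if "\n" not in stmt:
--         return [f"{base_indent}{stmt}"]
--
--     result: list[str] = []
--     leading = len(stmt) - len(stmt.lstrip(" "))
--     actual_indent = len(base_indent) + leading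
--     indent_stack = [actual_indent]
--     cur_line = base_indent
--     indent_width = len(INDENT_UNIT)
--
--     i = 0
--     while i < len(stmt):
--         ch = stmt[i]
--         if ch == "\n":
--             result.append(cur_line)
--             # Look ahead: if next non-space is '}', use the outer indent.
--             j = i + 1
--             while j < len(stmt) and stmt[j] == " ":
--                 j += 1
--             if j < len(stmt) and stmt[j] == "}":
--                 outer = indent_stack[-2] if len(indent_stack) > 1 else indent_stack[-1]
--                 cur_line = " " * outer
--             else:
--                 cur_line = " " * indent_stack[-1]
--         elif ch == "{":
--             cur_line += ch
--             indent_stack.append(indent_stack[-1] + indent_width)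
--         elif ch == "}":
--             if len(indent_stack) > 1:
--                 indent_stack.pop()
--             cur_line += ch
--         else:
--             cur_line += ch
--         i += 1
--
--     if cur_line.strip():
--         result.append(cur_line)
--     return result
-- ===== SOURCE B (Python) =====
-- INDENT_UNIT = "    "
--
-- def expand_multiline_stmt(stmt: str, base_indent: str) -> list[str]:
--     """Segment-based re-implementation: split on newlines once, then walk the
--     segments, choosing each line's indent from the brace stack before feeding
--     the segment's braces into it."""
--     if "\n" not in stmt:
--         return [f"{base_indent}{stmt}"]
--
--     indent_width = len(INDENT_UNIT)
--     leading = len(stmt) - len(stmt.lstrip(" "))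
--     stack = [len(base_indent) + leading]
--
--     def feed(seg):
--         for ch in seg:
--             if ch == "{":
--                 stack.append(stack[-1] + indent_width)
--             elif ch == "}" and len(stack) > 1:
--                 stack.pop()
--
--     def pick_indent(seg):
--         stripped = seg.lstrip(" ")
--         if stripped[:1] == "}":
--             return " " * (stack[-2] if len(stack) > 1 else stack[-1])
--         return " " * stack[-1]
--
--     segments = stmt.split("\n")
--     result = [base_indent + segments[0]]
--     feed(segments[0])
--     for seg in segments[1:-1]:
--         result.append(pick_indent(seg) + seg)
--         feed(seg)
--     last = segments[-1]
--     line = pick_indent(last) + last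
--     if line.strip():
--         result.append(line)
--     return result
-- ===== Notes on version B (the rewrite author's own statement) =====
-- stated objective: simpler
-- what changed: B splits the statement on newlines once and walks whole segments, choosing each line's indent from the brace stack per segment, instead of A's character-at-a-time scan with an explicit space-skipping lookahead loop.
import Mathlib
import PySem

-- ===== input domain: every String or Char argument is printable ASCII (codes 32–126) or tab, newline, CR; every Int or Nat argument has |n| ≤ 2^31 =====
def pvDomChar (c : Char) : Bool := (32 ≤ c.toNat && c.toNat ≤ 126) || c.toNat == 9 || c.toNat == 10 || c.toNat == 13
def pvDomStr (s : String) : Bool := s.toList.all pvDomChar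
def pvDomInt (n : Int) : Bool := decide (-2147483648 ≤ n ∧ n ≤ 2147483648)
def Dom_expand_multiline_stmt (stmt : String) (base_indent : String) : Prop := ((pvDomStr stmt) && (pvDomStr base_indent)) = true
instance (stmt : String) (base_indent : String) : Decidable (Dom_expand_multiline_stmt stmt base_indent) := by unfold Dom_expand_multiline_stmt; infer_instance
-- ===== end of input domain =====

-- B re-derives each line's indent per whole segment after a single split("\n")
-- instead of A's character-at-a-time scan with lookahead; objective: simpler, same cost.

-- ===== PORT A =====
-- lookahead "while j < len(stmt) and stmt[j] == ' ': j += 1; stmt[j] == '}'" as a recursion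
def pvNextIsBrace : List Char → Bool
  | [] => false
  | c :: t => if c == ' ' then pvNextIsBrace t else c == '}'

-- the while loop of A; state = (result, cur_line as chars, indent_stack with top at head)
def pvLoopA : List Char → List String → List Char → List Nat → List String
  | [], res, cur, _ =>
      -- "if cur_line.strip(): result.append(cur_line)"
      if (PySem.Chars.strip cur).isEmpty then res else res ++ [String.ofList cur]
  | c :: t, res, cur, stack =>
      if c == '\n' then
        let res' := res ++ [String.ofList cur]
        let cur' :=
          if pvNextIsBrace t then
            List.replicate (match stack with | _ :: b :: _ => b | _ => stack.headD 0) ' '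
          else
            List.replicate (stack.headD 0) ' '
        pvLoopA t res' cur' stack
      else if c == '{' then
        pvLoopA t res (cur ++ [c]) ((stack.headD 0 + 4) :: stack)   -- indent_width = len(INDENT_UNIT) = 4
      else if c == '}' then
        pvLoopA t res (cur ++ [c]) (if stack.length > 1 then stack.tail else stack)
      else
        pvLoopA t res (cur ++ [c]) stack

def expand_multiline_stmt (stmt : String) (base_indent : String) : List String :=
  if stmt.toList.contains '\n' = false then [base_indent ++ stmt]
  else
    -- leading = len(stmt) - len(stmt.lstrip(" "))
    let leading := stmt.toList.length - (stmt.toList.dropWhile (· == ' ')).length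
    pvLoopA stmt.toList [] base_indent.toList [base_indent.toList.length + leading]

-- ===== PORT B =====
-- stmt.split("\n"), exact (keeps empty pieces)
def pvSplitNL : List Char → List (List Char)
  | [] => [[]]
  | c :: t =>
      if c == '\n' then [] :: pvSplitNL t
      else
        match pvSplitNL t with
        | h :: r => (c :: h) :: r
        | [] => [[c]]

-- feed(seg): push/pop the brace stack over one segment
def pvFeed (stack : List Nat) (seg : List Char) : List Nat :=
  seg.foldl (fun st ch =>
    if ch == '{' then (st.headD 0 + 4) :: st
    else if ch == '}' && st.length > 1 then st.tail
    else st) stack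

-- pick_indent(seg): stripped = seg.lstrip(" "); outer level iff stripped[:1] == "}"
def pvPickIndent (stack : List Nat) (seg : List Char) : List Char :=
  match seg.dropWhile (· == ' ') with
  | '}' :: _ =>
      List.replicate (match stack with | _ :: b :: _ => b | _ => stack.headD 0) ' '
  | _ => List.replicate (stack.headD 0) ' '

-- the for loop over segments[1:], last segment appended only if line.strip()
def pvLoopB : List (List Char) → List String → List Nat → List String
  | [], res, _ => res
  | [last], res, stack =>
      let line := pvPickIndent stack last ++ last
      if (PySem.Chars.strip line).isEmpty then res else res ++ [String.ofList line]
  | seg :: rest, res, stack =>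
      pvLoopB rest (res ++ [String.ofList (pvPickIndent stack seg ++ seg)]) (pvFeed stack seg)

def expand_multiline_stmt_alt (stmt : String) (base_indent : String) : List String :=
  if stmt.toList.contains '\n' = false then [base_indent ++ stmt]
  else
    let leading := stmt.toList.length - (stmt.toList.dropWhile (· == ' ')).length
    let stack0 := [base_indent.toList.length + leading]
    match pvSplitNL stmt.toList with
    | [] => []  -- unreachable: split never returns an empty list
    | s0 :: rest => pvLoopB rest [String.ofList (base_indent.toList ++ s0)] (pvFeed stack0 s0)

-- ===== PRECONDITION & SPEC =====
def Spec_expand_multiline_stmt (stmt : String) (base_indent : String) (out : List String) : Prop := out = expand_multiline_stmt_alt stmt base_indent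
instance (stmt : String) (base_indent : String) (out : List String) : Decidable (Spec_expand_multiline_stmt stmt base_indent out) := by unfold Spec_expand_multiline_stmt; infer_instance

-- ===== CLAIM (what is proved, stated in full; the proofs are below) =====
def Claim_equal_expand_multiline_stmt : Prop := ∀ (stmt : String) (base_indent : String), Dom_expand_multiline_stmt stmt base_indent → Spec_expand_multiline_stmt stmt base_indent (expand_multiline_stmt stmt base_indent)

-- ===== LEMMAS AND PROOFS =====

def pvJoinNL : List (List Char) → List Char
  | [] => []
  | [s] => s
  | s :: r => s ++ '\n' :: pvJoinNL r

def pvIsBraceSeg (seg : List Char) : Bool :=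
  match seg.dropWhile (· == ' ') with
  | '}' :: _ => true
  | _ => false

lemma pvSplitNL_ne_nil (l : List Char) : pvSplitNL l ≠ [] := by
  cases l with
  | nil => simp [pvSplitNL]
  | cons c t =>
    simp only [pvSplitNL]
    by_cases hc : c = '\n'
    · rw [if_pos (by simp [hc])]; simp
    · rw [if_neg (by simpa using hc)]
      rcases hsp : pvSplitNL t with _ | _ <;> simp

lemma pvJoin_split (l : List Char) : pvJoinNL (pvSplitNL l) = l := by
  induction l with
  | nil => simp [pvSplitNL, pvJoinNL]
  | cons c t ih =>
    simp only [pvSplitNL]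
    by_cases hc : c = '\n'
    · subst hc
      rw [if_pos (by decide : ('\n' == '\n') = true)]
      rcases h : pvSplitNL t with _ | ⟨a, r⟩
      · exact absurd h (pvSplitNL_ne_nil t)
      · rw [h] at ih
        cases r <;> simp_all [pvJoinNL]
    · rw [if_neg (by simpa using hc)]
      rcases h : pvSplitNL t with _ | ⟨a, r⟩
      · exact absurd h (pvSplitNL_ne_nil t)
      · rw [h] at ih
        cases r <;> simp_all [pvJoinNL]

lemma pvSplitNL_no_nl (l : List Char) : ∀ s ∈ pvSplitNL l, '\n' ∉ s := by
  induction l with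
  | nil => simp [pvSplitNL]
  | cons c t ih =>
    simp only [pvSplitNL]
    by_cases hc : c = '\n'
    · subst hc; rw [if_pos (by decide : ('\n' == '\n') = true)]
      intro s hs
      rcases List.mem_cons.mp hs with h1 | h1
      · simp [h1]
      · exact ih s h1
    · rw [if_neg (by simpa using hc)]
      rcases hsp : pvSplitNL t with _ | ⟨a, r⟩
      · exact absurd hsp (pvSplitNL_ne_nil t)
      · intro s hs
        rcases List.mem_cons.mp hs with h1 | h1
        · subst h1
          have ha := ih a (by simp [hsp])
          simp only [List.mem_cons]
          rintro (rfl | hm)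
          · exact hc rfl
          · exact ha hm
        · exact ih s (by simp [hsp, h1])

lemma pvSplitNL_two (l : List Char) (h : l.contains '\n' = true) :
    ∃ a b r, pvSplitNL l = a :: b :: r := by
  induction l with
  | nil => simp at h
  | cons c t ih =>
    simp only [pvSplitNL]
    by_cases hc : c = '\n'
    · subst hc; rw [if_pos (by decide : ('\n' == '\n') = true)]
      rcases hsp : pvSplitNL t with _ | ⟨a, r⟩
      · exact absurd hsp (pvSplitNL_ne_nil t)
      · exact ⟨[], a, r, rfl⟩
    · rw [if_neg (by simpa using hc)]
      have ht : t.contains '\n' = true := by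
        simp only [List.contains_cons, Bool.or_eq_true, beq_iff_eq] at h
        rcases h with h' | h'
        · first
          | exact absurd h' hc
          | exact absurd h'.symm hc
        · exact h'
      obtain ⟨a, b, r, hr⟩ := ih ht
      rw [hr]
      exact ⟨c :: a, b, r, rfl⟩

-- consuming a newline-free segment in A's loop = appending it to cur_line and feeding the stack
lemma pvLoopA_feed (seg : List Char) (h : '\n' ∉ seg) :
    ∀ (t : List Char) (res : List String) (cur : List Char) (stack : List Nat),
      pvLoopA (seg ++ t) res cur stack = pvLoopA t res (cur ++ seg) (pvFeed stack seg) := by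
  induction seg with
  | nil => intro t res cur stack; simp [pvFeed]
  | cons c s ih =>
    intro t res cur stack
    have hc : c ≠ '\n' := by intro hcn; exact h (by simp [hcn])
    have hs : '\n' ∉ s := fun hm => h (by simp [hm])
    simp only [List.cons_append, pvLoopA, pvFeed, List.foldl_cons]
    rw [if_neg (show ¬ (c == '\n') = true by simpa using hc)]
    by_cases h1 : c = '{'
    · subst h1
      rw [if_pos (by simp)]
      simpa [pvFeed, List.append_assoc] using ih hs t res (cur ++ ['{']) ((stack.headD 0 + 4) :: stack)
    · rw [if_neg (by simpa using h1)]
      by_cases h2 : c = '}'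
      · subst h2
        rw [if_pos (by simp)]
        by_cases hl : stack.length > 1
        · rw [if_pos hl]
          simpa [pvFeed, hl, List.append_assoc] using ih hs t res (cur ++ ['}']) stack.tail
        · rw [if_neg hl]
          simpa [pvFeed, hl, List.append_assoc] using ih hs t res (cur ++ ['}']) stack
      · rw [if_neg (by simpa using h2)]
        have : (if c == '{' then (stack.headD 0 + 4) :: stack
                else if c == '}' && stack.length > 1 then stack.tail else stack) = stack := by
          simp [h1, h2]
        rw [this]
        simpa [pvFeed, List.append_assoc] using ih hs t res (cur ++ [c]) stack

lemma pvNextIsBrace_seg_nl (seg : List Char) (h : '\n' ∉ seg) (u : List Char) :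
    pvNextIsBrace (seg ++ '\n' :: u) = pvIsBraceSeg seg := by
  induction seg with
  | nil => simp [pvNextIsBrace, pvIsBraceSeg]
  | cons c s ih =>
    have hc : c ≠ '\n' := by intro hcn; exact h (by simp [hcn])
    have hs : '\n' ∉ s := fun hm => h (by simp [hm])
    simp only [List.cons_append, pvNextIsBrace, pvIsBraceSeg, List.dropWhile_cons]
    by_cases h1 : c = ' '
    · subst h1; simpa [pvIsBraceSeg] using ih hs
    · rw [if_neg (by simpa using h1), if_neg (by simpa using h1)]
      by_cases h2 : c = '}' <;> simp [h2]

lemma pvNextIsBrace_seg_end (seg : List Char) :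
    pvNextIsBrace seg = pvIsBraceSeg seg := by
  induction seg with
  | nil => simp [pvNextIsBrace, pvIsBraceSeg]
  | cons c s ih =>
    simp only [pvNextIsBrace, pvIsBraceSeg, List.dropWhile_cons]
    by_cases h1 : c = ' '
    · subst h1; simpa [pvIsBraceSeg] using ih
    · rw [if_neg (by simpa using h1), if_neg (by simpa using h1)]
      by_cases h2 : c = '}' <;> simp [h2]

lemma pvPickIndent_eq (stack : List Nat) (seg : List Char) :
    pvPickIndent stack seg =
      (if pvIsBraceSeg seg then
        List.replicate (match stack with | _ :: b :: _ => b | _ => stack.headD 0) ' '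
      else List.replicate (stack.headD 0) ' ') := by
  unfold pvPickIndent pvIsBraceSeg
  rcases h : seg.dropWhile (· == ' ') with _ | ⟨c, r⟩
  · simp
  · by_cases hc : c = '}'
    · subst hc; simp
    · have : (match c :: r with | '}' :: _ => true | _ => false) = false := by
        cases c; simp_all [Char.ext_iff]
      simp only [this, if_neg Bool.false_ne_true]
      cases c; simp_all [Char.ext_iff]

-- main invariant: A's char loop over the joined segments equals B's segment loop
lemma pvMain : ∀ (segs : List (List Char)) (s : List Char), '\n' ∉ s →
    (∀ x ∈ segs, '\n' ∉ x) → ∀ (res : List String) (cur : List Char) (stack : List Nat),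
    pvLoopA (pvJoinNL (s :: segs)) res cur stack =
      (match segs with
       | [] => if (PySem.Chars.strip (cur ++ s)).isEmpty then res else res ++ [String.ofList (cur ++ s)]
       | _ :: _ => pvLoopB segs (res ++ [String.ofList (cur ++ s)]) (pvFeed stack s)) := by
  intro segs
  induction segs with
  | nil =>
    intro s hs _ res cur stack
    have : pvJoinNL [s] = s ++ [] := by simp [pvJoinNL]
    rw [this, pvLoopA_feed s hs]
    simp [pvLoopA]
  | cons s1 rest ih =>
    intro s hs hall res cur stack
    have hs1 : '\n' ∉ s1 := hall s1 (by simp)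
    have hrest : ∀ x ∈ rest, '\n' ∉ x := fun x hx => hall x (by simp [hx])
    have hjoin : pvJoinNL (s :: s1 :: rest) = s ++ '\n' :: pvJoinNL (s1 :: rest) := by
      simp [pvJoinNL]
    rw [hjoin, pvLoopA_feed s hs]
    have hnib : pvNextIsBrace (pvJoinNL (s1 :: rest)) = pvIsBraceSeg s1 := by
      cases rest with
      | nil => simpa [pvJoinNL] using pvNextIsBrace_seg_end s1
      | cons a r =>
        have : pvJoinNL (s1 :: a :: r) = s1 ++ '\n' :: pvJoinNL (a :: r) := by simp [pvJoinNL]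
        rw [this]
        exact pvNextIsBrace_seg_nl s1 hs1 _
    have hA : pvLoopA ('\n' :: pvJoinNL (s1 :: rest)) res (cur ++ s) (pvFeed stack s) =
        pvLoopA (pvJoinNL (s1 :: rest)) (res ++ [String.ofList (cur ++ s)])
          (pvPickIndent (pvFeed stack s) s1) (pvFeed stack s) := by
      simp only [pvLoopA, if_pos (by simp : ('\n' == '\n') = true)]
      rw [hnib, pvPickIndent_eq]
    rw [hA, ih s1 hs1 hrest]
    cases rest with
    | nil => simp [pvLoopB]
    | cons a r => simp [pvLoopB]

-- ===== VERDICT (by name: the statement is the Claim_ definition above) =====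
theorem expand_multiline_stmt_spec : Claim_equal_expand_multiline_stmt := by
  intro stmt base_indent _
  unfold Spec_expand_multiline_stmt expand_multiline_stmt expand_multiline_stmt_alt
  by_cases h : stmt.toList.contains '\n' = false
  · rw [if_pos h, if_pos h]
  · rw [if_neg h, if_neg h]
    have hc : stmt.toList.contains '\n' = true := by
      cases hx : stmt.toList.contains '\n' <;> simp_all
    obtain ⟨a, b, r, hsp⟩ := pvSplitNL_two stmt.toList hc
    have hall : ∀ x ∈ pvSplitNL stmt.toList, '\n' ∉ x := pvSplitNL_no_nl stmt.toList
    have hstmt : stmt.toList = pvJoinNL (a :: b :: r) := by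
      rw [← hsp, pvJoin_split]
    rw [hsp] at hall
    have := pvMain (b :: r) a (hall a (by simp)) (fun x hx => hall x (by simp [hx]))
      [] base_indent.toList
      [base_indent.toList.length + (stmt.toList.length - (stmt.toList.dropWhile (· == ' ')).length)]
    rw [hsp]
    simp only
    rw [← hstmt] at this
    rw [this]
    simp
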